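-- pv_equiv track=rewrite | github.com/Shakemilktea/AES | AES/library.py | InvSubBytes
-- ===== SOURCE A (Python) =====
-- def SeparateKey(input_str):
--     """
--         Seperate String to List with step 2
--         ex:
--         input = '00112233445566778899aabbccddeeff'
--         output = ['00', '11', '22', '33', '44', '55', '66', '77', '88', '99', 'aa', 'bb', 'cc', 'dd', 'ee', 'ff']
--     :param input_str: String
--     :return: List
--     """
--     return [input_str[i:i+2] for i in range(0, len(input_str), 2)]
--
-- def InvSubBytes(input_hex_str):
--     """
--     :param input_hex_str: hex_str
--     :return: hex_str
--     """
--     input_lst = SeparateKey(input_hex_str)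
--     S_BOX = ['52', '09', '6a', 'd5', '30', '36', 'a5', '38', 'bf', '40', 'a3', '9e', '81', 'f3', 'd7', 'fb',
--              '7c', 'e3', '39', '82', '9b', '2f', 'ff', '87', '34', '8e', '43', '44', 'c4', 'de', 'e9', 'cb',
--              '54', '7b', '94', '32', 'a6', 'c2', '23', '3d', 'ee', '4c', '95', '0b', '42', 'fa', 'c3', '4e',
--              '08', '2e', 'a1', '66', '28', 'd9', '24', 'b2', '76', '5b', 'a2', '49', '6d', '8b', 'd1', '25',
--              '72', 'f8', 'f6', '64', '86', '68', '98', '16', 'd4', 'a4', '5c', 'cc', '5d', '65', 'b6', '92',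
--              '6c', '70', '48', '50', 'fd', 'ed', 'b9', 'da', '5e', '15', '46', '57', 'a7', '8d', '9d', '84',
--              '90', 'd8', 'ab', '00', '8c', 'bc', 'd3', '0a', 'f7', 'e4', '58', '05', 'b8', 'b3', '45', '06',
--              'd0', '2c', '1e', '8f', 'ca', '3f', '0f', '02', 'c1', 'af', 'bd', '03', '01', '13', '8a', '6b',
--              '3a', '91', '11', '41', '4f', '67', 'dc', 'ea', '97', 'f2', 'cf', 'ce', 'f0', 'b4', 'e6', '73',
--              '96', 'ac', '74', '22', 'e7', 'ad', '35', '85', 'e2', 'f9', '37', 'e8', '1c', '75', 'df', '6e',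
--              '47', 'f1', '1a', '71', '1d', '29', 'c5', '89', '6f', 'b7', '62', '0e', 'aa', '18', 'be', '1b',
--              'fc', '56', '3e', '4b', 'c6', 'd2', '79', '20', '9a', 'db', 'c0', 'fe', '78', 'cd', '5a', 'f4',
--              '1f', 'dd', 'a8', '33', '88', '07', 'c7', '31', 'b1', '12', '10', '59', '27', '80', 'ec', '5f',
--              '60', '51', '7f', 'a9', '19', 'b5', '4a', '0d', '2d', 'e5', '7a', '9f', '93', 'c9', '9c', 'ef',
--              'a0', 'e0', '3b', '4d', 'ae', '2a', 'f5', 'b0', 'c8', 'eb', 'bb', '3c', '83', '53', '99', '61',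
--              '17', '2b', '04', '7e', 'ba', '77', 'd6', '26', 'e1', '69', '14', '63', '55', '21', '0c', '7d']
--
--     return ''.join([S_BOX[int(i, 16)] for i in input_lst])
-- ===== SOURCE B (Python) =====
-- def _gf_mul(a, b):
--     # carry-less multiplication modulo the AES polynomial 0x11b
--     r = 0
--     for _ in range(8):
--         if b & 1:
--             r ^= a
--         b >>= 1
--         a <<= 1
--         if a & 0x100:
--             a ^= 0x11b
--     return r
--
-- def _gf_inv(a):
--     # multiplicative inverse as a^254 (Fermat); 0^254 = 0 gives inv(0) = 0
--     r = a
--     for _ in range(6):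
--         r = _gf_mul(_gf_mul(r, r), a)
--     return _gf_mul(r, r)
--
-- def _inv_sbox_byte(b):
--     # inverse affine transformation (three byte-rotations XOR 0x05), then GF(2^8) inverse
--     x = (((b << 1) | (b >> 7)) ^ ((b << 3) | (b >> 5)) ^ ((b << 6) | (b >> 2)) ^ 0x05) & 0xff
--     return _gf_inv(x)
--
-- def InvSubBytes(input_hex_str):
--     out = []
--     for i in range(0, len(input_hex_str), 2):
--         b = int(input_hex_str[i:i+2], 16) & 0xff
--         out.append('%02x' % _inv_sbox_byte(b))
--     return ''.join(out)
-- ===== Notes on version B (the rewrite author's own statement) =====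
-- stated objective: alternative
-- what changed: Replaces the 256-entry inverse S-box table lookup by computing each byte on the fly: inverse affine transformation (three byte rotations XOR 0x05), then the GF(2^8) multiplicative inverse as a^254 via carry-less multiplication modulo 0x11b, formatted as two lowercase zero-padded hex digits.
import Mathlib
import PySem

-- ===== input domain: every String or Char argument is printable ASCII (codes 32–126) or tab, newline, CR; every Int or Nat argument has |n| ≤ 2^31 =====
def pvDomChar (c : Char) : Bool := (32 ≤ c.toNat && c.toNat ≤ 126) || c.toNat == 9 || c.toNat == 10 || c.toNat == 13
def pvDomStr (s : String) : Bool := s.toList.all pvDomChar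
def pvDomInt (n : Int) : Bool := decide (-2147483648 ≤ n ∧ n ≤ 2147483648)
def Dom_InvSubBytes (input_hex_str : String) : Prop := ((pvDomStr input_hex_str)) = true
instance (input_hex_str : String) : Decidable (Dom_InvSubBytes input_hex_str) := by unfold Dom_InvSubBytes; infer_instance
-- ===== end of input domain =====

-- B replaces A's 256-entry inverse S-box table lookup by computing each byte on the fly
-- (inverse affine transformation, then GF(2^8) inverse as a^254); alternative algorithm, not faster.


-- ===== PORT A =====
def SeparateKey (input_str : String) : List String :=
  (PySem.List.pyRange 0 (PySem.Str.len input_str) 2).map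
    (fun i => PySem.Str.slice input_str (some i) (some (i + 2)))

def SBOX : List String := ["52", "09", "6a", "d5", "30", "36", "a5", "38", "bf", "40", "a3", "9e", "81", "f3", "d7", "fb", "7c", "e3", "39", "82", "9b", "2f", "ff", "87", "34", "8e", "43", "44", "c4", "de", "e9", "cb", "54", "7b", "94", "32", "a6", "c2", "23", "3d", "ee", "4c", "95", "0b", "42", "fa", "c3", "4e", "08", "2e", "a1", "66", "28", "d9", "24", "b2", "76", "5b", "a2", "49", "6d", "8b", "d1", "25", "72", "f8", "f6", "64", "86", "68", "98", "16", "d4", "a4", "5c", "cc", "5d", "65", "b6", "92", "6c", "70", "48", "50", "fd", "ed", "b9", "da", "5e", "15", "46", "57", "a7", "8d", "9d", "84", "90", "d8", "ab", "00", "8c", "bc", "d3", "0a", "f7", "e4", "58", "05", "b8", "b3", "45", "06", "d0", "2c", "1e", "8f", "ca", "3f", "0f", "02", "c1", "af", "bd", "03", "01", "13", "8a", "6b", "3a", "91", "11", "41", "4f", "67", "dc", "ea", "97", "f2", "cf", "ce", "f0", "b4", "e6", "73", "96", "ac", "74", "22", "e7", "ad", "35", "85", "e2", "f9", "37", "e8",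 "1c", "75", "df", "6e", "47", "f1", "1a", "71", "1d", "29", "c5", "89", "6f", "b7", "62", "0e", "aa", "18", "be", "1b", "fc", "56", "3e", "4b", "c6", "d2", "79", "20", "9a", "db", "c0", "fe", "78", "cd", "5a", "f4", "1f", "dd", "a8", "33", "88", "07", "c7", "31", "b1", "12", "10", "59", "27", "80", "ec", "5f", "60", "51", "7f", "a9", "19", "b5", "4a", "0d", "2d", "e5", "7a", "9f", "93", "c9", "9c", "ef", "a0", "e0", "3b", "4d", "ae", "2a", "f5", "b0", "c8", "eb", "bb", "3c", "83", "53", "99", "61", "17", "2b", "04", "7e", "ba", "77", "d6", "26", "e1", "69", "14", "63", "55", "21", "0c", "7d"]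

-- S_BOX[int(i, 16)] for each chunk i; Pre_ excludes the inputs where int(i, 16) raises ValueError
def InvSubBytes (input_hex_str : String) : String :=
  PySem.Str.join "" ((SeparateKey input_hex_str).map (fun i =>
    (PySem.List.pyGet? SBOX ((PySem.Int.ofStrBase? i 16).getD 0)).getD ""))

-- ===== PORT B =====
-- _gf_mul: the 'for _ in range(8)' loop as fuel recursion over the same (a, b, r) state
def gfMulAux : Nat → Int → Int → Int → Int
  | 0, _, _, r => r
  | n + 1, a, b, r =>
      let r' := if PySem.Int.band b 1 == 1 then PySem.Int.bxor r a else r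
      let b' := b >>> 1
      let a' := a <<< 1
      gfMulAux n (if PySem.Int.band a' 256 == 256 then PySem.Int.bxor a' 283 else a') b' r'

def gfMul (a b : Int) : Int := gfMulAux 8 a b 0

-- _gf_inv: r = a; 6 × (r = r²·a); return r²
def gfInvAux : Nat → Int → Int → Int
  | 0, _, r => r
  | n + 1, a, r => gfInvAux n a (gfMul (gfMul r r) a)

def gfInv (a : Int) : Int :=
  let r := gfInvAux 6 a a
  gfMul r r

-- _inv_sbox_byte: inverse affine transformation, then GF(2^8) inverse
def invSboxByte (b : Int) : Int :=
  gfInv (PySem.Int.band (PySem.Int.bxor (PySem.Int.bxor (PySem.Int.bxor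
    (PySem.Int.bor (b <<< 1) (b >>> 7)) (PySem.Int.bor (b <<< 3) (b >>> 5)))
    (PySem.Int.bor (b <<< 6) (b >>> 2))) 5) 255)

-- '%02x' of n: exact for 0 ≤ n < 256 (the only values B formats)
def hexChar (k : Int) : Char := if k < 10 then Char.ofNat (48 + k.toNat) else Char.ofNat (87 + k.toNat)
def toHex2 (n : Int) : List Char := [hexChar (PySem.Int.floordiv n 16), hexChar (PySem.Int.mod n 16)]

def InvSubBytes_alt (input_hex_str : String) : String :=
  PySem.Str.join "" ((PySem.List.pyRange 0 (PySem.Str.len input_hex_str) 2).map (fun i =>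
    String.ofList (toHex2 (invSboxByte (PySem.Int.band
      ((PySem.Int.ofStrBase? (PySem.Str.slice input_hex_str (some i) (some (i + 2))) 16).getD 0) 255)))))

-- ===== PRECONDITION & SPEC =====
-- the successive 2-character chunks of a string (the last may have 1 character)
def pvChunks : List Char → List (List Char)
  | [] => []
  | [a] => [[a]]
  | a :: b :: r => [a, b] :: pvChunks r

def pvChunkOK (c : List Char) : Bool :=
  match PySem.Int.ofCharsBase? c 16 with
  | some n => decide (-256 ≤ n ∧ n < 256)
  | none => false

-- Pre_: every 2-character chunk parses under int(·, 16) (A raises ValueError otherwise); the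
-- bounds −256 ≤ n < 256 are automatic for ≤2-character chunks, so nothing A returns on is excluded.
def Pre_InvSubBytes (input_hex_str : String) : Prop :=
  (pvChunks input_hex_str.toList).all pvChunkOK = true
instance (input_hex_str : String) : Decidable (Pre_InvSubBytes input_hex_str) := by
  unfold Pre_InvSubBytes; infer_instance

def pvWitness_InvSubBytes : String := "1a"

def Spec_InvSubBytes (input_hex_str : String) (out : String) : Prop := out = InvSubBytes_alt input_hex_str
instance (input_hex_str : String) (out : String) : Decidable (Spec_InvSubBytes input_hex_str out) := by unfold Spec_InvSubBytes; infer_instance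

-- ===== CLAIM (what is proved, stated in full; the proofs are below) =====
def Claim_equal_InvSubBytes : Prop := ∀ (input_hex_str : String), Dom_InvSubBytes input_hex_str → Pre_InvSubBytes input_hex_str → Spec_InvSubBytes input_hex_str (InvSubBytes input_hex_str)

-- ===== LEMMAS AND PROOFS =====
set_option maxRecDepth 10000
set_option maxHeartbeats 1000000

-- the GF(2^8) computation reproduces the table, entry by entry (0 ≤ n < 256)
theorem perByte_nonneg : ∀ k : Nat, k < 256 →
    (PySem.List.pyGet? SBOX ((k : Int))).getD "" =
      String.ofList (toHex2 (invSboxByte (PySem.Int.band ((k : Int)) 255))) := by decide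

-- for a negative parsed value −256 ≤ n < 0: A's negative list index wraps, B's & 0xff masks — same byte
theorem band_pos_byte : ∀ k : Nat, k < 256 → PySem.Int.band ((k : Int)) 255 = (k : Int) := by decide
theorem band_neg_byte : ∀ k : Nat, k < 256 → PySem.Int.band ((k : Int) - 256) 255 = (k : Int) := by decide

theorem SBOX_length : SBOX.length = 256 := by decide

theorem pyGet?_SBOX_wrap (k : Nat) (hk : k < 256) :
    PySem.List.pyGet? SBOX ((k : Int) - 256) = PySem.List.pyGet? SBOX ((k : Int)) := by
  have h1 : ((k : Int) - 256) = -(((256 - k : Nat) : Int)) := by omega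
  rw [h1, PySem.List.pyGet?_neg_natCast SBOX (256 - k) (by omega) (by rw [SBOX_length]; omega),
    PySem.List.pyGet?_natCast, SBOX_length, show 256 - (256 - k) = k by omega]

theorem perChunk (c : String) (h : pvChunkOK c.toList = true) :
    (PySem.List.pyGet? SBOX ((PySem.Int.ofStrBase? c 16).getD 0)).getD "" =
      String.ofList (toHex2 (invSboxByte (PySem.Int.band ((PySem.Int.ofStrBase? c 16).getD 0) 255))) := by
  have hb : PySem.Int.ofStrBase? c 16 = PySem.Int.ofCharsBase? c.toList 16 := by
    rw [← @String.ofList_toList c, PySem.Int.ofStrBase?_ofList]; simp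
  rw [hb]
  unfold pvChunkOK at h
  cases hp : PySem.Int.ofCharsBase? c.toList 16 with
  | none => rw [hp] at h; simp at h
  | some n =>
    rw [hp] at h
    simp only [decide_eq_true_eq] at h
    simp only [Option.getD_some]
    by_cases hn : 0 ≤ n
    · rw [show n = ((n.toNat : Nat) : Int) by omega]
      exact perByte_nonneg n.toNat (by omega)
    · have hk : (n + 256).toNat < 256 := by omega
      rw [show n = (((n + 256).toNat : Nat) : Int) - 256 by omega,
        band_neg_byte (n + 256).toNat hk, pyGet?_SBOX_wrap (n + 256).toNat hk]
      conv_rhs => rw [show (((n + 256).toNat : Nat) : Int) = PySem.Int.band (((n + 256).toNat : Nat) : Int) 255 from (band_pos_byte (n + 256).toNat hk).symm]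
      exact perByte_nonneg (n + 256).toNat hk

theorem take2_drop_mem : ∀ (j : Nat) (cs : List Char), 2 * j < cs.length →
    (cs.drop (2 * j)).take 2 ∈ pvChunks cs := by
  intro j
  induction j with
  | zero =>
    intro cs h
    match cs with
    | [] => simp at h
    | [a] => simp [pvChunks]
    | a :: b :: r => simp [pvChunks]
  | succ j ih =>
    intro cs h
    match cs with
    | [] => simp at h
    | [a] => simp at h
    | a :: b :: r =>
      have hmem : (r.drop (2 * j)).take 2 ∈ pvChunks r := ih r (by simp at h; omega)
      have hd : (a :: b :: r).drop (2 * (j + 1)) = r.drop (2 * j) := by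
        rw [show 2 * (j + 1) = 2 * j + 1 + 1 by ring, List.drop_succ_cons, List.drop_succ_cons]
      rw [hd]
      exact List.mem_cons_of_mem _ hmem

theorem slice_mem (cs : List Char) (i : Int)
    (hi : i ∈ PySem.List.pyRange 0 (cs.length : Int) 2) :
    PySem.List.slice cs (some i) (some (i + 2)) ∈ pvChunks cs := by
  rw [PySem.List.mem_pyRange_iff_of_pos (by norm_num)] at hi
  obtain ⟨h0, hlt, hdvd⟩ := hi
  obtain ⟨c, hc⟩ := hdvd
  rw [PySem.List.slice_toNat (xs := cs) (a := i) (b := i + 2) h0 (by omega)]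
  have hj : i.toNat = 2 * c.toNat := by omega
  rw [show (i + 2).toNat - i.toNat = 2 by omega, hj]
  exact take2_drop_mem c.toNat cs (by omega)

-- ===== VERDICT (by name: the statement is the Claim_ definition above) =====
theorem InvSubBytes_spec : Claim_equal_InvSubBytes := by
  intro s hdom hpre
  unfold Spec_InvSubBytes InvSubBytes InvSubBytes_alt SeparateKey
  rw [List.map_map]
  refine congrArg (PySem.Str.join "") (List.map_congr_left ?_)
  intro i hi
  simp only [Function.comp]
  apply perChunk
  have hb : (PySem.Str.slice s (some i) (some (i + 2))).toList
      = PySem.List.slice s.toList (some i) (some (i + 2)) := by simp [PySem.Str.slice]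
  rw [hb]
  refine List.all_eq_true.mp hpre _ ?_
  apply slice_mem
  simpa [PySem.Str.len] using hi
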